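-- pv_equiv track=rewrite | github.com/paoloacchiardi/Esercizi-estivi-Python | cap_11/es_11_4.py | ha_duplicati
-- ===== SOURCE A (Python) =====
-- def ha_duplicati(dizionario):
--     dizionario2 = {}
--     for key in dizionario:
--         if dizionario[key] in dizionario2.values():
--             return True
--         else:
--             dizionario2[key] = dizionario[key]
--     return False
-- ===== SOURCE B (Python) =====
-- def ha_duplicati(dizionario):
--     return len(set(dizionario.values())) != len(dizionario)
-- ===== Notes on version B (the rewrite author's own statement) =====
-- stated objective: simpler
-- what changed: Replaced A's incremental loop (rebuilding a second dict and scanning its values view for each key, with an early return) by a single set construction over the values and one length comparison.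
import Mathlib
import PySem

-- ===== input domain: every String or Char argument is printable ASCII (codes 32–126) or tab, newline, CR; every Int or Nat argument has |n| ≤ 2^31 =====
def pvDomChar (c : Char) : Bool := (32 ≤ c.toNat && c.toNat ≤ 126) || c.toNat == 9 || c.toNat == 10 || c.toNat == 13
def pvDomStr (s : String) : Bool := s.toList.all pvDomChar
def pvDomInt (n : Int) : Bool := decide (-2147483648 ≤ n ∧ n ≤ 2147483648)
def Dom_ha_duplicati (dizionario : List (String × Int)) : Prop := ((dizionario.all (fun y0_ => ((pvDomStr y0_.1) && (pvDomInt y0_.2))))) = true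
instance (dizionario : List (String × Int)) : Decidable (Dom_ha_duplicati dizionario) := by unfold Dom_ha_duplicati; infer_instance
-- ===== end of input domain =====

-- B replaces A's per-key scan of an accumulated second dict's values (early-return loop)
-- by one set construction over the values plus a length comparison (objective: simpler).

-- ===== PORT A =====
-- A's for-loop with its early 'return True'; d2 is A's 'dizionario2'
def haDupLoop (dd : PySem.Dict String Int) (ks : List String) (d2 : PySem.Dict String Int) : Bool :=
  match ks with
  | [] => false
  | k :: rest =>
    if (PySem.Dict.values d2).contains (PySem.Dict.getD dd k 0) then true
    else haDupLoop dd rest (PySem.Dict.insert d2 k (PySem.Dict.getD dd k 0))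

def ha_duplicati (dizionario : List (String × Int)) : Bool :=
  let dd := PySem.Dict.ofList dizionario
  haDupLoop dd (PySem.Dict.keys dd) PySem.Dict.empty

-- ===== PORT B =====
def ha_duplicati_alt (dizionario : List (String × Int)) : Bool :=
  let dd := PySem.Dict.ofList dizionario
  decide ((PySem.Set.ofList (PySem.Dict.values dd)).length ≠ (PySem.Dict.keys dd).length)

-- ===== PRECONDITION & SPEC =====
def Spec_ha_duplicati (dizionario : List (String × Int)) (out : Bool) : Prop := out = ha_duplicati_alt dizionario
instance (dizionario : List (String × Int)) (out : Bool) : Decidable (Spec_ha_duplicati dizionario out) := by unfold Spec_ha_duplicati; infer_instance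

-- ===== CLAIM (what is proved, stated in full; the proofs are below) =====
def Claim_equal_ha_duplicati : Prop := ∀ (dizionario : List (String × Int)), Dom_ha_duplicati dizionario → Spec_ha_duplicati dizionario (ha_duplicati dizionario)

-- ===== LEMMAS AND PROOFS =====

-- set(l) keeps exactly the distinct elements of l
theorem len_ofList_toFinset (l : List Int) : (PySem.Set.ofList l).length = l.toFinset.card := by
  rw [← List.toFinset_card_of_nodup (PySem.Set.nodup_ofList l)]
  congr 1
  ext x
  simp [PySem.Set.mem_ofList]

theorem len_ofList_eq_iff_nodup (l : List Int) :
    (PySem.Set.ofList l).length = l.length ↔ l.Nodup := by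
  constructor
  · intro h
    rw [len_ofList_toFinset, List.card_toFinset] at h
    rw [← (List.dedup_sublist l).eq_of_length h]
    exact l.nodup_dedup
  · intro h
    rw [PySem.Set.ofList_eq_self_of_nodup l h]

-- loop invariant: A's loop detects exactly a duplicate in d2.values ++ the remaining looked-up values
theorem haDupLoop_eq (dd : PySem.Dict String Int) (ks : List String) (d2 : PySem.Dict String Int)
    (hk : ks.Nodup) (hfresh : ∀ k ∈ ks, d2.contains k = false) (hv : d2.values.Nodup) :
    haDupLoop dd ks d2 =
      !decide (d2.values ++ ks.map (fun k => PySem.Dict.getD dd k 0)).Nodup := by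
  induction ks generalizing d2 with
  | nil => simp [haDupLoop, hv]
  | cons k rest ih =>
    simp only [haDupLoop]
    by_cases hin : (PySem.Dict.getD dd k 0) ∈ d2.values
    · have hc : (PySem.Dict.values d2).contains (PySem.Dict.getD dd k 0) = true := by
        simpa using hin
      rw [hc]
      have hnot : ¬ (d2.values ++ PySem.Dict.getD dd k 0 :: rest.map (fun k => PySem.Dict.getD dd k 0)).Nodup :=
        fun hnd => (List.nodup_append.mp hnd).2.2 _ hin (PySem.Dict.getD dd k 0) (by simp) rfl
      simp [hnot]
    · have hc : (PySem.Dict.values d2).contains (PySem.Dict.getD dd k 0) = false := by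
        simpa using hin
      rw [hc]
      simp only [Bool.false_eq_true, if_false]
      have hcontains : d2.contains k = false := hfresh k (by simp)
      have hvals : (PySem.Dict.insert d2 k (PySem.Dict.getD dd k 0)).values
          = d2.values ++ [PySem.Dict.getD dd k 0] := by
        simp [PySem.Dict.values, PySem.Dict.items_insert_of_not_contains d2 _ hcontains]
      rw [ih (PySem.Dict.insert d2 k (PySem.Dict.getD dd k 0))
            (by exact hk.of_cons)
            (by
              intro j hj
              rw [PySem.Dict.contains_insert]
              have hjk : j ≠ k := by
                rintro rfl
                exact (List.nodup_cons.mp hk).1 hj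
              simp [hjk, hfresh j (by simp [hj])])
            (by
              rw [hvals]
              refine List.Nodup.append hv (List.nodup_singleton _) ?_
              intro a ha
              simp only [List.mem_singleton]
              rintro rfl
              exact hin ha)]
      rw [hvals, List.append_assoc]
      simp

theorem ha_duplicati_eq_alt (dizionario : List (String × Int)) :
    ha_duplicati dizionario = ha_duplicati_alt dizionario := by
  unfold ha_duplicati ha_duplicati_alt
  set dd := PySem.Dict.ofList dizionario with hdd
  have hnk : dd.keys.Nodup := PySem.Dict.nodup_keys_ofList dizionario
  rw [haDupLoop_eq dd dd.keys PySem.Dict.empty hnk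
        (by intro k _; simp [PySem.Dict.contains_empty])
        (by simp [PySem.Dict.values, PySem.Dict.empty])]
  have h0 : (PySem.Dict.empty (κ := String) (ν := Int)).values = [] := rfl
  have hmap : dd.keys.map (fun k => PySem.Dict.getD dd k 0) = dd.values :=
    (PySem.Dict.values_eq_map_keys dd hnk 0).symm
  have hlen : (PySem.Dict.keys dd).length = (PySem.Dict.values dd).length := by
    simp [PySem.Dict.keys, PySem.Dict.values]
  rw [h0, List.nil_append, hmap]
  have hiff : ((PySem.Set.ofList dd.values).length ≠ dd.values.length) ↔ ¬ dd.values.Nodup :=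
    not_congr (len_ofList_eq_iff_nodup dd.values)
  show (!decide dd.values.Nodup)
      = decide ((PySem.Set.ofList dd.values).length ≠ dd.keys.length)
  rw [hlen, decide_eq_decide.mpr hiff, decide_not]

-- ===== VERDICT (by name: the statement is the Claim_ definition above) =====
theorem ha_duplicati_spec : Claim_equal_ha_duplicati := by
  intro d _
  unfold Spec_ha_duplicati
  exact ha_duplicati_eq_alt d
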